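-- pv_equiv track=rewrite | github.com/atharvaagrawal/dsa | Interview-Questions/Codenation/comedy_show.py | comedy_show
-- ===== SOURCE A (Python) =====
-- def comedy_show(A, B, C, D, E):
--     payments = [0] * len(C)
--     for i in range(len(C)):
--         for j in range(len(A)):
--             if E[i] == 1 and j < C[i]:
--                 continue
--             if E[i] == 2 and j < C[i] + len(A) // 2:
--                 continue
--             if E[i] == 1 and A[j] > D[i]:
--                 payments[i] += B[j]
--             elif E[i] == 2 and A[j] > 2 * D[i]:
--                 payments[i] += B[j]
--     return payments
-- ===== SOURCE B (Python) =====
-- def comedy_show(A, B, C, D, E):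
--     # Per DISTINCT (type-adjusted) threshold, build one suffix cumulative-sum
--     # table over the zipped (A, B) pairs and memoize it; each query is then a
--     # single clamped table lookup instead of a guarded scan of A.
--     n = len(A)
--     half = n // 2
--     pairs = list(zip(A, B))
--     m = len(pairs)
--     cache = {}
--     res = []
--     for c, d, e in zip(C, D, E):
--         if e == 1:
--             s, t = c, d
--         elif e == 2:
--             s, t = c + half, 2 * d
--         else:
--             res.append(0)
--             continue
--         if t not in cache:
--             suf = [0]
--             acc = 0
--             for a, b in reversed(pairs):
--                 if a > t:
--                     acc += b
--                 suf.append(acc)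
--             suf.reverse()
--             cache[t] = suf
--         res.append(cache[t][min(max(s, 0), m)])
--     return res
-- ===== Notes on version B (the rewrite author's own statement) =====
-- stated objective: faster
-- what changed: A answers each query by a guarded scan over every index of A accumulating into a preallocated payments array; B zips (A,B) once and, per DISTINCT type-adjusted threshold, builds a memoized suffix cumulative-sum table by one backward pass, answering each query by a single clamped table lookup.
-- outside the precondition, e.g. on comedy_show([5], [9], [0], [], [0]): A returns [0], B returns []; on comedy_show([], [], [0], [], []): A returns [0], B returns []
import Mathlib
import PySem

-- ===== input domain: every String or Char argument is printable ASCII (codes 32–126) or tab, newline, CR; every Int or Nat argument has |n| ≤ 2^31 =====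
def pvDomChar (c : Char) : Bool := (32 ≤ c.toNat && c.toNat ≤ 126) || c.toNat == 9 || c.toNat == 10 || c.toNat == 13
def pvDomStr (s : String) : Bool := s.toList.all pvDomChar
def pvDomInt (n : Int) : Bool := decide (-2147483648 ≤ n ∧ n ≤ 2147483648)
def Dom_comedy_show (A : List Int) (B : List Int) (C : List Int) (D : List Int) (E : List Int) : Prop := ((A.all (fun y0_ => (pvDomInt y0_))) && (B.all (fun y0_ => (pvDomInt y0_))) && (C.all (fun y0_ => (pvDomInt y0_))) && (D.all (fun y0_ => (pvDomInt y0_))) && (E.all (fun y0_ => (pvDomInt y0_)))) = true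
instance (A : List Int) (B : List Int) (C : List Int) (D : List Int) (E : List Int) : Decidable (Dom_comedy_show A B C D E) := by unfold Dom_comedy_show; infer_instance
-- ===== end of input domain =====

-- B replaces A's per-query guarded scan by memoized per-threshold suffix cumulative-sum
-- tables over the zipped (A,B) pairs, answering each query by one clamped table lookup
-- (objective: faster — a timing run measured B faster; equal worst case when all thresholds are distinct).

-- ===== PORT A =====
def comedy_show (A : List Int) (B : List Int) (C : List Int) (D : List Int) (E : List Int) : List Int :=
  let payments : List Int := List.replicate C.length 0
  (PySem.List.pyRange 0 (C.length : Int) 1).foldl (fun payments i =>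
    (PySem.List.pyRange 0 (A.length : Int) 1).foldl (fun p j =>
      if PySem.List.pyGetD E i 0 = 1 ∧ j < PySem.List.pyGetD C i 0 then p
      else if PySem.List.pyGetD E i 0 = 2 ∧ j < PySem.List.pyGetD C i 0 + PySem.Int.floordiv (A.length : Int) 2 then p
      else if PySem.List.pyGetD E i 0 = 1 ∧ PySem.List.pyGetD A j 0 > PySem.List.pyGetD D i 0 then
        PySem.List.pySetD p i (PySem.List.pyGetD p i 0 + PySem.List.pyGetD B j 0)
      else if PySem.List.pyGetD E i 0 = 2 ∧ PySem.List.pyGetD A j 0 > 2 * PySem.List.pyGetD D i 0 then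
        PySem.List.pySetD p i (PySem.List.pyGetD p i 0 + PySem.List.pyGetD B j 0)
      else p) payments) payments

-- ===== PORT B =====
-- the backward pass building the suffix cumulative-sum table (suf[k] = sum of b over pairs[k:] with a > t)
def sufCompute (P : List (Int × Int)) (t : Int) : List Int :=
  let st := P.reverse.foldl (fun (st : List Int × Int) ab =>
    let acc := if ab.1 > t then st.2 + ab.2 else st.2
    (st.1 ++ [acc], acc)) ([0], 0)
  st.1.reverse

-- `if t not in cache: cache[t] = build; …; cache[t]`
def getSuf (P : List (Int × Int)) (cache : PySem.Dict Int (List Int)) (t : Int) :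
    PySem.Dict Int (List Int) × List Int :=
  let cache := if cache.contains t then cache else cache.insert t (sufCompute P t)
  (cache, cache.getD t [])

def altStep (P : List (Int × Int)) (m : Int) (half : Int)
    (st : PySem.Dict Int (List Int) × List Int) (cde : Int × Int × Int) :
    PySem.Dict Int (List Int) × List Int :=
  if cde.2.2 = 1 then
    let r := getSuf P st.1 cde.2.1
    (r.1, st.2 ++ [PySem.List.pyGetD r.2 (min (max cde.1 0) m) 0])
  else if cde.2.2 = 2 then
    let r := getSuf P st.1 (2 * cde.2.1)
    (r.1, st.2 ++ [PySem.List.pyGetD r.2 (min (max (cde.1 + half) 0) m) 0])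
  else (st.1, st.2 ++ [0])

def comedy_show_alt (A : List Int) (B : List Int) (C : List Int) (D : List Int) (E : List Int) : List Int :=
  let pairs := A.zip B
  ((C.zip (D.zip E)).foldl
    (altStep pairs (pairs.length : Int) (PySem.Int.floordiv (A.length : Int) 2))
    (PySem.Dict.empty, [])).2

-- ===== PRECONDITION & SPEC =====
-- Pre_ excludes inputs where A's lazy indexing raises IndexError (a triggered payment reads B
-- past its end) and ragged query lists D/E shorter than C, where a returned value of A is only
-- an accident of which accesses its guards happen to skip.
def Pre_comedy_show (A : List Int) (B : List Int) (C : List Int) (D : List Int) (E : List Int) : Prop :=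
  C.length ≤ D.length ∧ C.length ≤ E.length ∧
  ∀ i < C.length, ∀ j < A.length, B.length ≤ j →
    ¬((E.getD i 0 = 1 ∧ C.getD i 0 ≤ (j : Int) ∧ D.getD i 0 < A.getD j 0) ∨
      (E.getD i 0 = 2 ∧ C.getD i 0 + PySem.Int.floordiv (A.length : Int) 2 ≤ (j : Int) ∧
        2 * D.getD i 0 < A.getD j 0))
instance (A : List Int) (B : List Int) (C : List Int) (D : List Int) (E : List Int) : Decidable (Pre_comedy_show A B C D E) := by
  unfold Pre_comedy_show
  exact instDecidableAnd (dq := instDecidableAnd)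

def pvWitness_comedy_show : List Int × List Int × List Int × List Int × List Int :=
  ([3, 1], [5, 7], [0, 1], [2, 0], [1, 2])

def Spec_comedy_show (A : List Int) (B : List Int) (C : List Int) (D : List Int) (E : List Int) (out : List Int) : Prop := out = comedy_show_alt A B C D E
instance (A : List Int) (B : List Int) (C : List Int) (D : List Int) (E : List Int) (out : List Int) : Decidable (Spec_comedy_show A B C D E out) := by unfold Spec_comedy_show; infer_instance

-- ===== CLAIM (what is proved, stated in full; the proofs are below) =====
def Claim_equal_comedy_show : Prop := ∀ (A : List Int) (B : List Int) (C : List Int) (D : List Int) (E : List Int), Dom_comedy_show A B C D E → Pre_comedy_show A B C D E → Spec_comedy_show A B C D E (comedy_show A B C D E)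

-- ===== LEMMAS AND PROOFS =====

-- B-side proof helpers: a structural-recursion reading of the suffix table
def sufRec : List (Int × Int) → Int → List Int
  | [], _ => [0]
  | ab :: ps, t => ((sufRec ps t).headD 0 + (if ab.1 > t then ab.2 else 0)) :: sufRec ps t

lemma sufCompute_fold (t : Int) : ∀ (P : List (Int × Int)),
    (P.reverse.foldl (fun (st : List Int × Int) ab =>
      let acc := if ab.1 > t then st.2 + ab.2 else st.2
      (st.1 ++ [acc], acc)) ([0], 0))
    = ((sufRec P t).reverse, (sufRec P t).headD 0) := by
  intro P
  induction P with
  | nil => rfl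
  | cons ab ps ih =>
    rw [List.reverse_cons, List.foldl_append, ih]
    simp only [List.foldl_cons, List.foldl_nil, sufRec]
    by_cases h : ab.1 > t <;> simp [h]

lemma sufCompute_eq_sufRec (P : List (Int × Int)) (t : Int) :
    sufCompute P t = sufRec P t := by
  unfold sufCompute
  rw [sufCompute_fold]
  simp

lemma sufRec_length (P : List (Int × Int)) (t : Int) :
    (sufRec P t).length = P.length + 1 := by
  induction P with
  | nil => rfl
  | cons ab ps ih => simp [sufRec, ih]

lemma sufRec_headD (P : List (Int × Int)) (t : Int) :
    (sufRec P t).headD 0 = ((P.filter (fun ab => ab.1 > t)).map (fun ab => ab.2)).sum := by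
  induction P with
  | nil => simp [sufRec]
  | cons ab ps ih =>
    simp only [sufRec, List.headD_cons, List.filter_cons]
    rw [ih]
    by_cases h : ab.1 > t
    · simp [h, add_comm]
    · simp [h]

lemma sufRec_getD (t : Int) : ∀ (P : List (Int × Int)) (k : Nat),
    (sufRec P t).getD k 0 = (((P.drop k).filter (fun ab => ab.1 > t)).map (fun ab => ab.2)).sum := by
  intro P
  induction P with
  | nil =>
    intro k
    cases k <;> simp [sufRec]
  | cons ab ps ih =>
    intro k
    cases k with
    | zero =>
      have := sufRec_headD (ab :: ps) t
      simpa [sufRec, List.headD] using this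
    | succ k =>
      simp only [sufRec, List.getD_cons_succ, List.drop_succ_cons]
      exact ih k

lemma zip_drop_comm (A B : List Int) : ∀ (k : Nat),
    (A.drop k).zip (B.drop k) = (A.zip B).drop k := by
  intro k
  induction k generalizing A B with
  | zero => simp
  | succ k ih =>
    cases A with
    | nil => simp
    | cons a as =>
      cases B with
      | nil => simp
      | cons b bs => simpa using ih as bs

-- per-query value computed by B (after resolving the cache): a clamped table lookup
def qval2 (P : List (Int × Int)) (m half c d e : Int) : Int :=
  if e = 1 then PySem.List.pyGetD (sufCompute P d) (min (max c 0) m) 0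
  else if e = 2 then PySem.List.pyGetD (sufCompute P (2 * d)) (min (max (c + half) 0) m) 0
  else 0

-- the cache only ever holds the tables it claims to
def CacheInv (P : List (Int × Int)) (cache : PySem.Dict Int (List Int)) : Prop :=
  ∀ k : Int, cache.contains k = true → cache.getD k [] = sufCompute P k

lemma getSuf_snd (P : List (Int × Int)) (cache : PySem.Dict Int (List Int)) (t : Int)
    (h : CacheInv P cache) : (getSuf P cache t).2 = sufCompute P t := by
  unfold getSuf
  by_cases hc : cache.contains t
  · simpa [hc] using h t hc
  · simp only [hc, Bool.false_eq_true, if_false]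
    exact PySem.Dict.getD_insert_self cache t (sufCompute P t) []

lemma getSuf_inv (P : List (Int × Int)) (cache : PySem.Dict Int (List Int)) (t : Int)
    (h : CacheInv P cache) : CacheInv P (getSuf P cache t).1 := by
  unfold getSuf
  by_cases hc : cache.contains t
  · simpa [hc] using h
  · simp only [hc, Bool.false_eq_true, if_false]
    intro k hk
    by_cases hkt : k = t
    · subst hkt
      exact PySem.Dict.getD_insert_self cache k (sufCompute P k) []
    · rw [PySem.Dict.getD_insert_of_ne cache (sufCompute P t) [] hkt]
      apply h
      rw [PySem.Dict.contains_insert] at hk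
      simpa [hkt] using hk

lemma alt_fold (P : List (Int × Int)) (m half : Int) :
    ∀ (L : List (Int × Int × Int)) (cache : PySem.Dict Int (List Int)) (res : List Int),
      CacheInv P cache →
      (L.foldl (altStep P m half) (cache, res)).2
        = res ++ L.map (fun cde => qval2 P m half cde.1 cde.2.1 cde.2.2) := by
  intro L
  induction L with
  | nil => intro cache res _; simp
  | cons x L ih =>
    intro cache res hinv
    rcases x with ⟨c, d, e⟩
    simp only [List.foldl_cons, List.map_cons]
    by_cases h1 : e = 1
    · subst h1
      have hstep : altStep P m half (cache, res) (c, d, 1)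
          = ((getSuf P cache d).1, res ++ [PySem.List.pyGetD (sufCompute P d) (min (max c 0) m) 0]) := by
        simp [altStep, getSuf_snd P cache d hinv]
      rw [hstep, ih _ _ (getSuf_inv P cache d hinv)]
      simp [qval2]
    · by_cases h2 : e = 2
      · subst h2
        have hstep : altStep P m half (cache, res) (c, d, 2)
            = ((getSuf P cache (2 * d)).1, res ++ [PySem.List.pyGetD (sufCompute P (2 * d)) (min (max (c + half) 0) m) 0]) := by
          simp [altStep, getSuf_snd P cache (2 * d) hinv]
        rw [hstep, ih _ _ (getSuf_inv P cache (2 * d) hinv)]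
        simp [qval2]
      · have hstep : altStep P m half (cache, res) (c, d, e) = (cache, res ++ [0]) := by
          simp [altStep, h1, h2]
        rw [hstep, ih _ _ hinv]
        simp [qval2, h1, h2]

lemma alt_eq_map (A B C D E : List Int) :
    comedy_show_alt A B C D E
      = (C.zip (D.zip E)).map (fun cde =>
          qval2 (A.zip B) ((A.zip B).length : Int) (PySem.Int.floordiv (A.length : Int) 2)
            cde.1 cde.2.1 cde.2.2) := by
  unfold comedy_show_alt
  rw [alt_fold _ _ _ _ PySem.Dict.empty [] (by intro k hk; simp [PySem.Dict.contains_empty] at hk)]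
  simp

-- the table lookup equals the filtered suffix sum over the zipped pairs
lemma lookup_eq (A B : List Int) (s t : Int) :
    PySem.List.pyGetD (sufCompute (A.zip B) t) (min (max s 0) ((A.zip B).length : Int)) 0
      = ((((A.zip B).drop (max 0 s).toNat).filter (fun ab => ab.1 > t)).map (fun ab => ab.2)).sum := by
  set P := A.zip B
  have hlen := sufRec_length P t
  have hidx0 : (0 : Int) ≤ min (max s 0) (P.length : Int) := by omega
  have hidxlt : min (max s 0) (P.length : Int) < ((sufRec P t).length : Int) := by
    rw [hlen]; push_cast; omega
  rw [sufCompute_eq_sufRec]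
  rw [PySem.List.pyGetD_eq_getElem _ 0 hidx0 hidxlt]
  have hget : (sufRec P t)[(min (max s 0) (P.length : Int)).toNat]'(by omega)
      = (sufRec P t).getD (min (max s 0) (P.length : Int)).toNat 0 :=
    (List.getD_eq_getElem _ _ (by omega)).symm
  rw [hget, sufRec_getD]
  by_cases hs : max s 0 ≤ (P.length : Int)
  · have : (min (max s 0) (P.length : Int)).toNat = (max 0 s).toNat := by omega
    rw [this]
  · have h1 : (min (max s 0) (P.length : Int)).toNat = P.length := by omega
    have h2 : P.length ≤ (max 0 s).toNat := by omega
    rw [h1, List.drop_length, List.drop_eq_nil_of_le h2]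

-- the per-query value of B, in the filtered-suffix-sum form the A-side lemmas target
def altSuffixSum (A : List Int) (B : List Int) (s : Int) (t : Int) : Int :=
  ((((PySem.List.slice A (some s) none).zip (PySem.List.slice B (some s) none)).filter
      (fun ab => ab.1 > t)).map (fun ab => ab.2)).sum

def qval (A : List Int) (B : List Int) (c d e : Int) : Int :=
  if e = 1 then altSuffixSum A B (max 0 c) d
  else if e = 2 then altSuffixSum A B (max 0 (c + PySem.Int.floordiv (A.length : Int) 2)) (2 * d)
  else 0

lemma altSuffixSum_eq_zipdrop (A B : List Int) (s t : Int) (hs : 0 ≤ s) :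
    altSuffixSum A B s t
      = ((((A.zip B).drop s.toNat).filter (fun ab => ab.1 > t)).map (fun ab => ab.2)).sum := by
  unfold altSuffixSum
  rw [PySem.List.slice_from A hs, PySem.List.slice_from B hs, zip_drop_comm]

lemma qval2_eq_qval (A B : List Int) (c d e : Int) :
    qval2 (A.zip B) ((A.zip B).length : Int) (PySem.Int.floordiv (A.length : Int) 2) c d e
      = qval A B c d e := by
  unfold qval2 qval
  split_ifs with h1 h2
  · rw [lookup_eq, altSuffixSum_eq_zipdrop A B _ d (le_max_left 0 c)]
  · rw [lookup_eq, altSuffixSum_eq_zipdrop A B _ (2 * d) (le_max_left 0 _)]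
  · rfl

-- ===== A-side lemmas =====

-- per-element contribution inside A's inner loop (c2 = C[i] + len(A)//2)
def acontrib (A : List Int) (B : List Int) (c c2 d e : Int) (j : Int) : Int :=
  if e = 1 ∧ j < c then 0
  else if e = 2 ∧ j < c2 then 0
  else if e = 1 ∧ PySem.List.pyGetD A j 0 > d then PySem.List.pyGetD B j 0
  else if e = 2 ∧ PySem.List.pyGetD A j 0 > 2 * d then PySem.List.pyGetD B j 0
  else 0

-- total added to payments[i] by A's inner loop
def aSum (A : List Int) (B : List Int) (C : List Int) (D : List Int) (E : List Int) (i : Nat) : Int :=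
  ((PySem.List.pyRange 0 (A.length : Int) 1).map
    (acontrib A B (C.getD i 0) (C.getD i 0 + PySem.Int.floordiv (A.length : Int) 2) (D.getD i 0) (E.getD i 0))).sum

lemma inner_eq (A : List Int) (B : List Int) (c c2 d e : Int) (i : Int) (hi : 0 ≤ i) :
    ∀ (L : List Int) (p : List Int), i.toNat < p.length →
      (L.foldl (fun p j =>
        if e = 1 ∧ j < c then p
        else if e = 2 ∧ j < c2 then p
        else if e = 1 ∧ PySem.List.pyGetD A j 0 > d then
          PySem.List.pySetD p i (PySem.List.pyGetD p i 0 + PySem.List.pyGetD B j 0)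
        else if e = 2 ∧ PySem.List.pyGetD A j 0 > 2 * d then
          PySem.List.pySetD p i (PySem.List.pyGetD p i 0 + PySem.List.pyGetD B j 0)
        else p) p)
      = p.set i.toNat (p.getD i.toNat 0 + (L.map (acontrib A B c c2 d e)).sum) := by
  intro L
  induction L with
  | nil =>
    intro p hp
    simp only [List.foldl_nil, List.map_nil, List.sum_nil, add_zero]
    rw [List.getD_eq_getElem _ _ hp, List.set_getElem_self hp]
  | cons j L ih =>
    intro p hp
    simp only [List.foldl_cons, List.map_cons, List.sum_cons, acontrib]
    have hset : PySem.List.pySetD p i (PySem.List.pyGetD p i 0 + PySem.List.pyGetD B j 0)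
        = p.set i.toNat (p.getD i.toNat 0 + PySem.List.pyGetD B j 0) := by
      rw [PySem.List.pySetD_of_nonneg p _ hi,
        PySem.List.pyGetD_eq_getElem p 0 hi (by omega),
        List.getD_eq_getElem _ _ hp]
    split_ifs with h1 h2 h3 h4
    · rw [ih p hp]; ring_nf
    · rw [ih p hp]; ring_nf
    · rw [hset, ih _ (by simpa using hp)]
      simp [hp, List.getElem_set_self, List.set_set]
      ring_nf
    · rw [hset, ih _ (by simpa using hp)]
      simp [hp, List.getElem_set_self, List.set_set]
      ring_nf
    · rw [ih p hp]; ring_nf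

lemma fold_set_inv (mC : Nat) (f : Nat → Int) (g : List Int → Int → List Int)
    (hg : ∀ (p : List Int) (i : Nat), p.length = mC → i < mC →
      g p (i : Int) = p.set i (p.getD i 0 + f i)) :
    ∀ k : Nat, k ≤ mC →
      (PySem.List.pyRange 0 (k : Int) 1).foldl g (List.replicate mC 0)
        = (List.range mC).map (fun i => if i < k then f i else 0) := by
  intro k
  induction k with
  | zero =>
    intro _
    rw [PySem.List.pyRange_one_eq_nil (by norm_num)]
    apply List.ext_getElem
    · simp
    · intro u h1 h2
      simp [List.getElem_replicate]
  | succ n ih =>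
    intro hk
    have hrange : PySem.List.pyRange 0 ((n + 1 : Nat) : Int) 1
        = PySem.List.pyRange 0 (n : Int) 1 ++ [(n : Int)] := by
      push_cast
      exact PySem.List.pyRange_one_succ_right (by positivity)
    rw [hrange, List.foldl_append, List.foldl_cons, List.foldl_nil, ih (by omega)]
    have hlen : ((List.range mC).map (fun i => if i < n then f i else 0)).length = mC := by simp
    rw [hg _ n hlen (by omega)]
    have hgetD : ((List.range mC).map (fun i => if i < n then f i else 0)).getD n 0 = 0 := by
      rw [List.getD_eq_getElem _ _ (by simp; omega)]
      simp
    rw [hgetD]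
    apply List.ext_getElem
    · simp
    · intro u h1 h2
      simp only [List.getElem_set, List.getElem_map, List.getElem_range]
      by_cases hun : u = n
      · subst hun
        simp
      · have h' : ¬ n = u := fun h => hun h.symm
        simp [h', show u < n ↔ u < n + 1 from by omega]

-- sum over an unguarded index suffix = the zipped-suffix sum (safe past B's end)
lemma suffix_sum (t : Int) :
    ∀ (m k : Nat) (A B : List Int),
      (∀ j : Nat, k ≤ j → B.length ≤ j → j < A.length → ¬ t < A.getD j 0) →
      m = A.length - k →
      ((PySem.List.pyRange (k : Int) (A.length : Int) 1).map
        (fun j => if PySem.List.pyGetD A j 0 > t then PySem.List.pyGetD B j 0 else 0)).sum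
      = ((((A.drop k).zip (B.drop k)).filter (fun ab => ab.1 > t)).map (fun ab => ab.2)).sum := by
  intro m
  induction m with
  | zero =>
    intro k A B _ hm
    have hk : A.length ≤ k := by omega
    rw [PySem.List.pyRange_one_eq_nil (by exact_mod_cast hk)]
    rw [List.drop_eq_nil_of_le hk]
    simp
  | succ m ih =>
    intro k A B hsafe hm
    have hk : k < A.length := by omega
    by_cases hkB : k < B.length
    · rw [PySem.List.pyRange_one_cons (by exact_mod_cast hk)]
      have hdA : A.drop k = A[k] :: A.drop (k + 1) := List.drop_eq_getElem_cons hk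
      have hdB : B.drop k = B[k] :: B.drop (k + 1) := List.drop_eq_getElem_cons hkB
      have hcast : (k : Int) + 1 = ((k + 1 : Nat) : Int) := by push_cast; ring
      rw [hdA, hdB, hcast, List.map_cons, List.sum_cons, List.zip_cons_cons,
        ih (k + 1) A B (fun j h1 h2 h3 => hsafe j (by omega) h2 h3) (by omega)]
      have hA : PySem.List.pyGetD A (k : Int) 0 = A[k] := by
        rw [PySem.List.pyGetD_eq_getElem A 0 (by positivity) (by exact_mod_cast hk)]
        simp
      have hBk : PySem.List.pyGetD B (k : Int) 0 = B[k] := by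
        rw [PySem.List.pyGetD_eq_getElem B 0 (by positivity) (by exact_mod_cast hkB)]
        simp
      rw [hA, hBk]
      by_cases h : A[k] > t
      · simp [h]
      · simp [h]
    · have hBd : B.drop k = [] := List.drop_eq_nil_of_le (by omega)
      rw [hBd, List.zip_nil_right]
      have hzero : ∀ x ∈ PySem.List.pyRange (k : Int) (A.length : Int) 1,
          (if PySem.List.pyGetD A x 0 > t then PySem.List.pyGetD B x 0 else 0) = (0 : Int) := by
        intro x hx
        rw [PySem.List.mem_pyRange_one] at hx
        have hx0 : 0 ≤ x := by omega
        have hxA : x.toNat < A.length := by omega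
        have := hsafe x.toNat (by omega) (by omega) hxA
        rw [if_neg (by
          rw [PySem.List.pyGetD_eq_getElem A 0 hx0 (by omega)]
          rw [List.getD_eq_getElem _ _ hxA] at this
          exact this)]
      rw [List.map_congr_left hzero]
      simp

-- sum with the `j < c'` skip guard = B's suffix sum from max(0, c')
lemma guarded_sum (A : List Int) (B : List Int) (c' t : Int)
    (hsafe : ∀ j : Nat, B.length ≤ j → j < A.length → c' ≤ (j : Int) → ¬ t < A.getD j 0) :
    ((PySem.List.pyRange 0 (A.length : Int) 1).map
      (fun j => if j < c' then 0 else if PySem.List.pyGetD A j 0 > t then PySem.List.pyGetD B j 0 else 0)).sum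
    = altSuffixSum A B (max 0 c') t := by
  unfold altSuffixSum
  rw [PySem.List.slice_from A (le_max_left 0 c'), PySem.List.slice_from B (le_max_left 0 c')]
  by_cases hc : c' ≤ 0
  · have hmax : max 0 c' = 0 := by omega
    rw [hmax]
    have hcongr : ∀ j ∈ PySem.List.pyRange 0 (A.length : Int) 1,
        (if j < c' then 0 else if PySem.List.pyGetD A j 0 > t then PySem.List.pyGetD B j 0 else 0)
        = (if PySem.List.pyGetD A j 0 > t then PySem.List.pyGetD B j 0 else 0) := by
      intro j hj
      rw [PySem.List.mem_pyRange_one] at hj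
      rw [if_neg (by omega)]
    rw [List.map_congr_left hcongr]
    have := suffix_sum t (A.length - 0) 0 A B (fun j _ h2 h3 => hsafe j h2 h3 (by omega)) rfl
    simpa using this
  · push_neg at hc
    have hmax : max 0 c' = c' := by omega
    rw [hmax]
    by_cases hcn : (A.length : Int) ≤ c'
    · have h1 : ∀ j ∈ PySem.List.pyRange 0 (A.length : Int) 1,
          (if j < c' then 0 else if PySem.List.pyGetD A j 0 > t then PySem.List.pyGetD B j 0 else 0)
          = (0 : Int) := by
        intro j hj
        rw [PySem.List.mem_pyRange_one] at hj
        rw [if_pos (by omega)]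
      rw [List.map_congr_left h1]
      have hdrop : A.drop c'.toNat = [] := List.drop_eq_nil_of_le (by omega)
      rw [hdrop]
      simp
    · push_neg at hcn
      rw [PySem.List.pyRange_one_append 0 c' (A.length : Int) (by omega) (le_of_lt hcn),
        List.map_append, List.sum_append]
      have h1 : ∀ j ∈ PySem.List.pyRange 0 c' 1,
          (if j < c' then 0 else if PySem.List.pyGetD A j 0 > t then PySem.List.pyGetD B j 0 else 0)
          = (0 : Int) := by
        intro j hj
        rw [PySem.List.mem_pyRange_one] at hj
        rw [if_pos (by omega)]
      have h2 : ∀ j ∈ PySem.List.pyRange c' (A.length : Int) 1,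
          (if j < c' then 0 else if PySem.List.pyGetD A j 0 > t then PySem.List.pyGetD B j 0 else 0)
          = (if PySem.List.pyGetD A j 0 > t then PySem.List.pyGetD B j 0 else 0) := by
        intro j hj
        rw [PySem.List.mem_pyRange_one] at hj
        rw [if_neg (by omega)]
      rw [List.map_congr_left h1, List.map_congr_left h2]
      have hck : c' = ((c'.toNat : Nat) : Int) := by omega
      rw [hck]
      have := suffix_sum t (A.length - c'.toNat) c'.toNat A B (fun j h1 h2 h3 => hsafe j h2 h3 (by omega)) rfl
      simp only [this]
      simp [show max c' 0 = c' from by omega]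

lemma pointwise (A : List Int) (B : List Int) (c d e : Int)
    (hsafe : ∀ j < A.length, B.length ≤ j →
      ¬((e = 1 ∧ c ≤ (j : Int) ∧ d < A.getD j 0) ∨
        (e = 2 ∧ c + PySem.Int.floordiv (A.length : Int) 2 ≤ (j : Int) ∧ 2 * d < A.getD j 0))) :
    ((PySem.List.pyRange 0 (A.length : Int) 1).map
      (acontrib A B c (c + PySem.Int.floordiv (A.length : Int) 2) d e)).sum
    = qval A B c d e := by
  by_cases h1 : e = 1
  · subst h1
    unfold qval
    rw [if_pos rfl]
    rw [← guarded_sum A B c d (fun j h2 h3 hcj hlt => hsafe j h3 h2 (Or.inl ⟨rfl, hcj, hlt⟩))]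
    congr 1
    apply List.map_congr_left
    intro j _
    unfold acontrib
    by_cases hj : j < c
    · simp [hj]
    · by_cases ha : PySem.List.pyGetD A j 0 > d <;> simp [hj, ha]
  · by_cases h2 : e = 2
    · subst h2
      unfold qval
      rw [if_neg (by norm_num), if_pos rfl]
      rw [← guarded_sum A B (c + PySem.Int.floordiv (A.length : Int) 2) (2 * d) (fun j h2 h3 hcj hlt => hsafe j h3 h2 (Or.inr ⟨rfl, hcj, hlt⟩))]
      congr 1
      apply List.map_congr_left
      intro j _
      unfold acontrib
      by_cases hj : j < c + PySem.Int.floordiv (A.length : Int) 2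
      · simp [hj]
      · by_cases ha : PySem.List.pyGetD A j 0 > 2 * d <;> simp [hj, ha]
    · unfold qval
      rw [if_neg h1, if_neg h2]
      have h0 : ∀ j ∈ PySem.List.pyRange 0 (A.length : Int) 1,
          acontrib A B c (c + PySem.Int.floordiv (A.length : Int) 2) d e j = 0 := by
        intro j _
        unfold acontrib
        simp [h1, h2]
      rw [List.map_congr_left h0]
      simp

-- ===== VERDICT =====
theorem comedy_show_spec : Claim_equal_comedy_show := by
  intro A B C D E _ hpre
  obtain ⟨hD, hE, hsafe⟩ := hpre
  unfold Spec_comedy_show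
  unfold comedy_show
  rw [alt_eq_map]
  have hg : ∀ (p : List Int) (i : Nat), p.length = C.length → i < C.length →
      (PySem.List.pyRange 0 (A.length : Int) 1).foldl (fun p j =>
        if PySem.List.pyGetD E (i : Int) 0 = 1 ∧ j < PySem.List.pyGetD C (i : Int) 0 then p
        else if PySem.List.pyGetD E (i : Int) 0 = 2 ∧ j < PySem.List.pyGetD C (i : Int) 0 + PySem.Int.floordiv (A.length : Int) 2 then p
        else if PySem.List.pyGetD E (i : Int) 0 = 1 ∧ PySem.List.pyGetD A j 0 > PySem.List.pyGetD D (i : Int) 0 then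
          PySem.List.pySetD p (i : Int) (PySem.List.pyGetD p (i : Int) 0 + PySem.List.pyGetD B j 0)
        else if PySem.List.pyGetD E (i : Int) 0 = 2 ∧ PySem.List.pyGetD A j 0 > 2 * PySem.List.pyGetD D (i : Int) 0 then
          PySem.List.pySetD p (i : Int) (PySem.List.pyGetD p (i : Int) 0 + PySem.List.pyGetD B j 0)
        else p) p
      = p.set i (p.getD i 0 + aSum A B C D E i) := by
    intro p i hp hi
    have := inner_eq A B (PySem.List.pyGetD C (i : Int) 0)
      (PySem.List.pyGetD C (i : Int) 0 + PySem.Int.floordiv (A.length : Int) 2)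
      (PySem.List.pyGetD D (i : Int) 0) (PySem.List.pyGetD E (i : Int) 0) (i : Int)
      (by positivity) (PySem.List.pyRange 0 (A.length : Int) 1) p (by simpa [hp])
    rw [this]
    simp [aSum]
  rw [fold_set_inv C.length (aSum A B C D E) _ hg C.length le_rfl]
  apply List.ext_getElem
  · simp; omega
  · intro i h1 h2
    simp only [List.getElem_map, List.getElem_range, List.getElem_zip]
    have hiC : i < C.length := by simpa using h1
    rw [if_pos hiC]
    rw [qval2_eq_qval]
    have hgoal := pointwise A B (C.getD i 0) (D.getD i 0) (E.getD i 0) (fun j hj hBj => hsafe i hiC j hj hBj)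
    unfold aSum
    rw [hgoal]
    have hc : C.getD i 0 = C[i] := List.getD_eq_getElem _ _ hiC
    have hd : D.getD i 0 = D[i] := List.getD_eq_getElem _ _ (by omega)
    have he : E.getD i 0 = E[i] := List.getD_eq_getElem _ _ (by omega)
    rw [hc, hd, he]
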